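-- pv_equiv track=rewrite | github.com/SapienzaNLP/nounatlas | code_files_nominal_srl/data_mapping/sentence_mapping_common.py | check_no_false_between_trues
-- ===== SOURCE A (Python) =====
-- def check_no_false_between_trues(bool_list):
--     state = 0
--     for b in bool_list:
--         if state == 0 and not b: continue
--         elif state == 0 and b: state = 1
--         elif state == 1 and not b: state = 2
--         elif state == 2 and b: return False
--     return True
-- ===== SOURCE B (Python) =====
-- def check_no_false_between_trues(bool_list):
--     idx = [i for i, b in enumerate(bool_list) if b]
--     return not idx or idx[-1] - idx[0] + 1 == len(idx)
-- ===== Notes on version B (the rewrite author's own statement) =====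
-- stated objective: simpler
-- what changed: Replaced the 3-state transition machine with a one-line collection of truthy indices followed by an arithmetic span-equals-count contiguity check.
import Mathlib
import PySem

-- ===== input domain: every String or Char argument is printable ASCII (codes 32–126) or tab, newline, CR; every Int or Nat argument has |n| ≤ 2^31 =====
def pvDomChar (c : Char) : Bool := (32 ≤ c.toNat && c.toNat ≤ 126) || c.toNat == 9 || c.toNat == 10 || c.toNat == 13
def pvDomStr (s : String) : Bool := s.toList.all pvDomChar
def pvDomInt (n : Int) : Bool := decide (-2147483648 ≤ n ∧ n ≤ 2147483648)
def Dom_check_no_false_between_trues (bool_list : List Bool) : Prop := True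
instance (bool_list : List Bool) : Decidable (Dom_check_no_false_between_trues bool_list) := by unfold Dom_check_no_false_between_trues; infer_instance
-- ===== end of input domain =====

-- B replaces A's 3-state transition machine by collecting the truthy indices once and
-- checking contiguity arithmetically (span = count); objective: simpler.

-- ===== PORT A =====
-- the for-loop over bool_list with the integer `state` variable, branches in source order
def pvGoA (state : Int) : List Bool → Bool
  | [] => true
  | b :: rest =>
    if state = 0 ∧ b = false then pvGoA state rest    -- continue
    else if state = 0 ∧ b = true then pvGoA 1 rest
    else if state = 1 ∧ b = false then pvGoA 2 rest
    else if state = 2 ∧ b = true then false           -- return False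
    else pvGoA state rest                             -- fall through: state unchanged

def check_no_false_between_trues (bool_list : List Bool) : Bool :=
  pvGoA 0 bool_list

-- ===== PORT B =====
def check_no_false_between_trues_alt (bool_list : List Bool) : Bool :=
  -- idx = [i for i, b in enumerate(bool_list) if b]
  let idx : List Int := ((PySem.List.enumerate bool_list).filter (fun p => p.2)).map (fun p => p.1)
  -- return not idx or idx[-1] - idx[0] + 1 == len(idx)
  if idx = [] then true
  else decide (idx.getLastD 0 - idx.headD 0 + 1 = (idx.length : Int))

-- ===== PRECONDITION & SPEC =====
def Spec_check_no_false_between_trues (bool_list : List Bool) (out : Bool) : Prop := out = check_no_false_between_trues_alt bool_list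
instance (bool_list : List Bool) (out : Bool) : Decidable (Spec_check_no_false_between_trues bool_list out) := by unfold Spec_check_no_false_between_trues; infer_instance

-- ===== CLAIM (what is proved, stated in full; the proofs are below) =====
def Claim_equal_check_no_false_between_trues : Prop := ∀ (bool_list : List Bool), Dom_check_no_false_between_trues bool_list → Spec_check_no_false_between_trues bool_list (check_no_false_between_trues bool_list)

-- ===== LEMMAS AND PROOFS =====

-- the truthy-index list of B, generalized over the enumeration start (proof helper)
def pvF (s : Int) (l : List Bool) : List Int :=
  ((PySem.List.enumerate l s).filter (fun p => p.2)).map (fun p => p.1)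

theorem pvF_nil (s : Int) : pvF s [] = [] := by
  simp [pvF, PySem.List.enumerate_nil]

theorem pvF_cons_true (s : Int) (r : List Bool) :
    pvF s (true :: r) = s :: pvF (s + 1) r := by
  simp [pvF, PySem.List.enumerate_cons]

theorem pvF_cons_false (s : Int) (r : List Bool) :
    pvF s (false :: r) = pvF (s + 1) r := by
  simp [pvF, PySem.List.enumerate_cons]

theorem pvF_last_ge (s : Int) (l : List Bool) (h : pvF s l ≠ []) :
    s + ((pvF s l).length : Int) - 1 ≤ (pvF s l).getLastD 0 := by
  induction l generalizing s with
  | nil => simp [pvF_nil] at h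
  | cons b r ih =>
    cases b with
    | false =>
      rw [pvF_cons_false] at h ⊢
      have := ih (s + 1) h
      omega
    | true =>
      rw [pvF_cons_true] at h ⊢
      by_cases h' : pvF (s + 1) r = []
      · simp [h']
      · have := ih (s + 1) h'
        rcases hF : pvF (s + 1) r with _ | ⟨x, xs⟩
        · exact absurd hF h'
        · rw [hF] at this
          simp only [List.getLastD_cons, List.length_cons] at this ⊢
          push_cast at this ⊢
          omega

theorem pvGoA_two (s : Int) (l : List Bool) :
    pvGoA 2 l = decide (pvF s l = []) := by
  induction l generalizing s with
  | nil => simp [pvGoA, pvF_nil]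
  | cons b r ih =>
    cases b with
    | false => simp [pvGoA, pvF_cons_false, ih (s + 1)]
    | true => simp [pvGoA, pvF_cons_true]

theorem pvGoA_one (s : Int) (l : List Bool) :
    pvGoA 1 l = decide (pvF s l = [] ∨ (pvF s l).getLastD 0 = s + ((pvF s l).length : Int) - 1) := by
  induction l generalizing s with
  | nil => simp [pvGoA, pvF_nil]
  | cons b r ih =>
    cases b with
    | false =>
      have step : pvGoA 1 (false :: r) = pvGoA 2 r := by simp [pvGoA]
      rw [step, pvGoA_two (s + 1) r, pvF_cons_false]
      by_cases h : pvF (s + 1) r = []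
      · simp [h]
      · have hg := pvF_last_ge (s + 1) r h
        have hlen : pvF (s + 1) r ≠ [] → 0 < (pvF (s + 1) r).length := List.length_pos_of_ne_nil
        have hlen' := hlen h
        have hne : ¬ ((pvF (s + 1) r).getLastD 0 = s + ((pvF (s + 1) r).length : Int) - 1) := by
          omega
        simp only [decide_eq_decide]
        tauto
    | true =>
      have step : pvGoA 1 (true :: r) = pvGoA 1 r := by simp [pvGoA]
      rw [step, ih (s + 1), pvF_cons_true]
      rcases hF : pvF (s + 1) r with _ | ⟨x, xs⟩
      · simp
      · simp only [List.getLastD_cons, List.length_cons, decide_eq_decide,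
          List.cons_ne_nil, false_or]
        generalize xs.getLastD x = k
        push_cast
        omega

theorem pvGoA_zero (s : Int) (l : List Bool) :
    pvGoA 0 l = decide (pvF s l = [] ∨
      (pvF s l).getLastD 0 - (pvF s l).headD 0 + 1 = ((pvF s l).length : Int)) := by
  induction l generalizing s with
  | nil => simp [pvGoA, pvF_nil]
  | cons b r ih =>
    cases b with
    | false =>
      have step : pvGoA 0 (false :: r) = pvGoA 0 r := by simp [pvGoA]
      rw [step, ih (s + 1), pvF_cons_false]
    | true =>
      have step : pvGoA 0 (true :: r) = pvGoA 1 r := by simp [pvGoA]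
      rw [step, pvGoA_one (s + 1) r, pvF_cons_true]
      rcases hF : pvF (s + 1) r with _ | ⟨x, xs⟩
      · simp
      · simp only [List.getLastD_cons, List.length_cons, List.headD_cons, decide_eq_decide,
          List.cons_ne_nil, false_or]
        generalize xs.getLastD x = k
        push_cast
        omega

-- ===== VERDICT (by name: the statement is the Claim_ definition above) =====
theorem check_no_false_between_trues_spec : Claim_equal_check_no_false_between_trues := by
  intro l _
  show check_no_false_between_trues l = check_no_false_between_trues_alt l
  rw [check_no_false_between_trues, check_no_false_between_trues_alt, pvGoA_zero 0 l]
  show _ = (if pvF 0 l = [] then true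
    else decide ((pvF 0 l).getLastD 0 - (pvF 0 l).headD 0 + 1 = ((pvF 0 l).length : Int)))
  by_cases h : pvF 0 l = []
  · simp [h]
  · simp [h]
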